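-- pv_equiv track=rewrite | github.com/oneshan/leetcode-python | problems/1636.number-of-substrings-with-only-1s/solution_1314986750.py | numSub
-- ===== SOURCE A (Python) =====
-- def numSub(s: str) -> int:
--     MOD = 1_000_000_007
--     ans = 0
--     left = -1
--     for right in range(len(s)):
--         if s[right] == '0':
--             left = right
--         ans += (right - left)
--
--     return ans % MOD
-- ===== SOURCE B (Python) =====
-- def numSub(s: str) -> int:
--     MOD = 1_000_000_007
--     total = 0
--     run = 0
--     for c in s:
--         if c == '0':
--             total += run * (run + 1) // 2
--             run = 0
--         else:
--             run += 1
--     total += run * (run + 1) // 2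
--     return total % MOD
-- ===== Notes on version B (the rewrite author's own statement) =====
-- stated objective: faster
-- what changed: B replaces A's index loop that adds at every position the distance to the last zero character with a single pass over the characters that counts each maximal run and adds the closed form run*(run+1)//2 once per run, doing one addition per run instead of per character.
import Mathlib
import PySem

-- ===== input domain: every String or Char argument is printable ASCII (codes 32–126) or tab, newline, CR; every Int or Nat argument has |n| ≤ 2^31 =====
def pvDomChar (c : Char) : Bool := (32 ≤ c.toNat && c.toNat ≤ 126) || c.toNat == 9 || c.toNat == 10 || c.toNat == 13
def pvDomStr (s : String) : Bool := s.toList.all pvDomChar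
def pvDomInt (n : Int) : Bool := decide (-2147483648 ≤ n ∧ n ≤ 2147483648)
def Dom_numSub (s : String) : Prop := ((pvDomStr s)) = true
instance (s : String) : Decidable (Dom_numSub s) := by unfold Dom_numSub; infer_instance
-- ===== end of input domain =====

-- B replaces A's per-character "distance to the last '0'" accumulation with a per-run
-- closed-form summation (run*(run+1)//2 added once per maximal run): same O(n), measurably faster by constant factor.

-- ===== PORT A =====
-- loop body of A: if s[right] == '0': left = right; ans += (right - left)
def numSubStepA (cs : List Char) (st : Int × Int) (right : Int) : Int × Int :=
  let left := if PySem.List.pyGet? cs right = some '0' then right else st.2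
  (st.1 + (right - left), left)

def numSub (s : String) : Int :=
  let cs := s.toList
  let res := (PySem.List.pyRange 0 (PySem.List.len cs) 1).foldl (numSubStepA cs) (0, -1)
  PySem.Int.mod res.1 1000000007

-- ===== PORT B =====
-- loop body of B: close off a run at '0' with run*(run+1)//2, else extend the run
def numSubStepB (st : Int × Int) (c : Char) : Int × Int :=
  if c = '0' then (st.1 + PySem.Int.floordiv (st.2 * (st.2 + 1)) 2, 0)
  else (st.1, st.2 + 1)

def numSub_alt (s : String) : Int :=
  let st := s.toList.foldl numSubStepB (0, 0)
  PySem.Int.mod (st.1 + PySem.Int.floordiv (st.2 * (st.2 + 1)) 2) 1000000007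

-- ===== PRECONDITION & SPEC =====
def Spec_numSub (s : String) (out : Int) : Prop := out = numSub_alt s
instance (s : String) (out : Int) : Decidable (Spec_numSub s out) := by unfold Spec_numSub; infer_instance

-- ===== CLAIM (what is proved, stated in full; the proofs are below) =====
def Claim_equal_numSub : Prop := ∀ (s : String), Dom_numSub s → Spec_numSub s (numSub s)

-- ===== LEMMAS AND PROOFS =====

-- triangular number via Python floor division, the per-run closed form of B
def pvTri (r : Int) : Int := PySem.Int.floordiv (r * (r + 1)) 2

lemma pvTri_succ (r : Int) : pvTri (r + 1) = pvTri r + (r + 1) := by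
  obtain ⟨k, hk⟩ := Int.even_mul_succ_self r
  unfold pvTri
  rw [PySem.Int.floordiv_eq_ediv_of_pos (by norm_num),
      PySem.Int.floordiv_eq_ediv_of_pos (by norm_num)]
  have h2 : (r + 1) * (r + 1 + 1) = (k + k) + 2 * (r + 1) := by
    rw [← hk]; ring
  rw [h2, hk]
  omega

-- loop invariant: A's state (ans, left) at index i corresponds to B's state (total, run)
-- via ans = total + pvTri run and left = i - 1 - run
lemma numSub_key (rest : List Char) : ∀ (cs : List Char) (i : Nat) (t r : Int),
    cs.drop i = rest →
    ((PySem.List.pyRange (i : Int) (PySem.List.len cs) 1).foldl (numSubStepA cs)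
        (t + pvTri r, (i : Int) - 1 - r)).1
      = (rest.foldl numSubStepB (t, r)).1 + pvTri (rest.foldl numSubStepB (t, r)).2 := by
  induction rest with
  | nil =>
    intro cs i t r h
    rw [PySem.List.pyRange_one_eq_nil]
    · simp
    · have : cs.length ≤ i := List.drop_eq_nil_iff.mp h
      simp only [PySem.List.len_eq]
      exact_mod_cast this
  | cons c rest' ih =>
    intro cs i t r h
    have hi : i < cs.length := by
      by_contra hle
      rw [List.drop_eq_nil_iff.mpr (by omega)] at h
      exact (List.cons_ne_nil c rest') h.symm
    have hget : cs[i]? = some c := by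
      rw [← List.head?_drop, h]; rfl
    have hdrop' : cs.drop (i + 1) = rest' := by
      have := congrArg List.tail h
      rwa [List.tail_drop] at this
    rw [PySem.List.pyRange_one_cons (by simp only [PySem.List.len_eq]; exact_mod_cast hi)]
    simp only [List.foldl_cons]
    have h0 : pvTri 0 = 0 := by decide
    by_cases hc : c = '0'
    · have hstep : numSubStepA cs (t + pvTri r, (i : Int) - 1 - r) (i : Int)
          = ((t + pvTri r) + pvTri 0, ((i : Int) + 1) - 1 - 0) := by
        simp only [numSubStepA, PySem.List.pyGet?_natCast, hget, hc,
          if_true, Prod.mk.injEq, h0]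
        constructor <;> ring
      have hstepB : numSubStepB (t, r) c = (t + pvTri r, 0) := by
        simp [numSubStepB, hc, pvTri]
      have hih := ih cs (i + 1) (t + pvTri r) 0 hdrop'
      push_cast at hih
      rw [hstep, hstepB, hih]
    · have hstep : numSubStepA cs (t + pvTri r, (i : Int) - 1 - r) (i : Int)
          = (t + pvTri (r + 1), ((i : Int) + 1) - 1 - (r + 1)) := by
        simp only [numSubStepA, PySem.List.pyGet?_natCast, hget,
          Option.some.injEq, hc, if_false, Prod.mk.injEq]
        rw [pvTri_succ]
        constructor <;> ring
      have hstepB : numSubStepB (t, r) c = (t, r + 1) := by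
        simp [numSubStepB, hc]
      have hih := ih cs (i + 1) t (r + 1) hdrop'
      push_cast at hih
      rw [hstep, hstepB, hih]

-- ===== VERDICT (by name: the statement is the Claim_ definition above) =====
theorem numSub_spec : Claim_equal_numSub := by
  intro s _
  show numSub s = numSub_alt s
  simp only [numSub, numSub_alt]
  have h := numSub_key s.toList s.toList 0 0 0 List.drop_zero
  have e : ((0 : Int) + pvTri 0, ((0 : Nat) : Int) - 1 - 0) = ((0 : Int), (-1 : Int)) := by
    decide
  rw [e] at h
  unfold pvTri at h
  simp only [Nat.cast_zero] at h
  rw [h]
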